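-- pv_equiv track=rewrite | github.com/Talendar/word_tokenizer | tokenizer.py | _merge_tokens_counts
-- ===== SOURCE A (Python) =====
-- def _merge_tokens_counts(counts):
--     total_count = {}
--     for count in counts:
--         for token in count:
--             if token not in total_count:
--                 total_count[token] = 0
--             total_count[token] += count[token]
--     return total_count
-- ===== SOURCE B (Python) =====
-- def _merge_tokens_counts(counts):
--     order = dict.fromkeys(t for count in counts for t in count)
--     return {t: sum(c.get(t, 0) for c in counts) for t in order}
-- ===== Notes on version B (the rewrite author's own statement) =====
-- stated objective: alternative
-- what changed: B inverts the loop nesting: it first computes the ordered universe of tokens (dict.fromkeys over all keys, first-appearance order) and then builds the result in one comprehension summing c.get(t, 0) across all dicts per token, instead of A's single-pass accumulation into a mutable dict with a membership-initialisation branch.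
import Mathlib
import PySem

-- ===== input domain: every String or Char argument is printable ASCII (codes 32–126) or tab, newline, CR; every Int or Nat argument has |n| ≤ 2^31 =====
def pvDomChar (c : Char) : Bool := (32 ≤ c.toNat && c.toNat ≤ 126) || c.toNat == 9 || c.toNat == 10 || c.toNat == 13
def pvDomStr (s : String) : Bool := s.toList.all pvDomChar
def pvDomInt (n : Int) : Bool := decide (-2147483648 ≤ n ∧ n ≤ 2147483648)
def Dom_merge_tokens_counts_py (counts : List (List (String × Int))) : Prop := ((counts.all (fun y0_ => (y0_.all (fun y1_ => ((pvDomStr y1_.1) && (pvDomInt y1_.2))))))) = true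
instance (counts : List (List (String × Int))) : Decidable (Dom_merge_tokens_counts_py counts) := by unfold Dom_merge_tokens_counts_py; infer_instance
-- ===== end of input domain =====

-- B inverts the loop nesting: ordered token universe first, then one summing comprehension per token (alternative decomposition, not claimed faster).


-- ===== PORT A =====
-- A: single pass, accumulating into a mutable dict; 'for token in count' iterates the
-- dict's keys and 'count[token]' is the dict lookup (PySem.Dict.getD on the assoc list).
def merge_tokens_counts_py (counts : List (List (String × Int))) : List (String × Int) :=
  (counts.foldl
    (fun total_count count =>
      (count.map Prod.fst).foldl
        (fun total_count token =>
          let total_count :=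
            if total_count.contains token then total_count else total_count.insert token 0
          total_count.insert token
            (total_count.getD token 0 + (PySem.Dict.mk count).getD token 0))
        total_count)
    PySem.Dict.empty).items

-- ===== PORT B =====
-- B: dict.fromkeys gives the tokens in first-appearance order (PySem.List.dedup), then
-- one comprehension sums c.get(t, 0) over every dict per token.
def merge_tokens_counts_py_alt (counts : List (List (String × Int))) : List (String × Int) :=
  (PySem.List.dedup (counts.flatMap (fun count => count.map Prod.fst))).map
    (fun t => (t, (counts.map (fun c => (PySem.Dict.mk c).getD t 0)).sum))

-- ===== PRECONDITION & SPEC =====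
-- Pre_ only states the dict SHAPE: each inner association list (the representation of a
-- Python dict) has pairwise-distinct keys, which every actual Python dict argument has by
-- construction; it excludes no input the Python function can receive.
def Pre_merge_tokens_counts_py (counts : List (List (String × Int))) : Prop :=
  ∀ c ∈ counts, (c.map Prod.fst).Nodup
instance (counts : List (List (String × Int))) : Decidable (Pre_merge_tokens_counts_py counts) := by
  unfold Pre_merge_tokens_counts_py; infer_instance
def pvWitness_merge_tokens_counts_py : (List (List (String × Int))) :=
  [[("a", 1), ("b", 2)], [("b", 3)]]

def Spec_merge_tokens_counts_py (counts : List (List (String × Int))) (out : List (String × Int)) : Prop := out = merge_tokens_counts_py_alt counts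
instance (counts : List (List (String × Int))) (out : List (String × Int)) : Decidable (Spec_merge_tokens_counts_py counts out) := by unfold Spec_merge_tokens_counts_py; infer_instance

-- ===== CLAIM (what is proved, stated in full; the proofs are below) =====
def Claim_equal_merge_tokens_counts_py : Prop := ∀ (counts : List (List (String × Int))), Dom_merge_tokens_counts_py counts → Pre_merge_tokens_counts_py counts → Spec_merge_tokens_counts_py counts (merge_tokens_counts_py counts)

-- ===== LEMMAS AND PROOFS =====

-- A's inner body ('if absent, set to 0, then +=') is one insert of (old getD + value).
lemma inner_eq_insert (d : PySem.Dict String Int) (token : String) (v : Int) :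
    (let d' := if d.contains token then d else d.insert token 0;
     d'.insert token (d'.getD token 0 + v))
      = d.insert token (d.getD token 0 + v) := by
  by_cases h : d.contains token = true
  · exact congrArg
      (fun dd : PySem.Dict String Int => dd.insert token (dd.getD token 0 + v)) (if_pos h)
  · have hb : d.contains token = false := by simpa using h
    have h1 : (let d' := if d.contains token then d else d.insert token 0;
        d'.insert token (d'.getD token 0 + v))
        = (d.insert token 0).insert token ((d.insert token 0).getD token 0 + v) :=
      congrArg
        (fun dd : PySem.Dict String Int => dd.insert token (dd.getD token 0 + v)) (if_neg h)
    have h2 : (d.insert token 0).getD token 0 = (0 : Int) := by simp [pysem]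
    have h3 : d.getD token 0 = (0 : Int) := by
      rw [PySem.Dict.getD_eq_get?_getD]
      have hn : d.get? token = none := by
        rw [PySem.Dict.get?_eq_none_iff_not_mem_keys]
        intro hm
        have := (PySem.Dict.contains_iff_mem_keys d token).2 hm
        simp [this] at hb
      simp [hn]
    rw [h1, h2, h3, zero_add]
    have hk : ∀ p ∈ d.items, (p.1 == token) = false := by
      intro p hp
      simp only [beq_eq_false_iff_ne, ne_eq]
      intro heq
      have hmem : token ∈ d.keys := by
        simp only [PySem.Dict.keys]
        exact heq ▸ List.mem_map_of_mem hp
      have := (PySem.Dict.contains_iff_mem_keys d token).2 hmem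
      simp [this] at hb
    have hc1 : (d.insert token 0).contains token = true := by simp [pysem]
    apply PySem.Dict.ext
    simp [PySem.Dict.items_insert, hc1, hb]
    conv_rhs => rw [← List.map_id d.items]
    refine List.map_congr_left (fun p hp => ?_)
    have hne := hk p hp
    simp only [beq_eq_false_iff_ne, ne_eq] at hne
    simp [hne]

-- The value at t after one key loop with Nodup keys.
lemma getD_foldl_keys (ks : List String) (g : String → Int) (t : String) :
    ∀ d : PySem.Dict String Int, ks.Nodup →
    (ks.foldl (fun d k => d.insert k (d.getD k 0 + g k)) d).getD t 0
      = d.getD t 0 + (if t ∈ ks then g t else 0) := by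
  induction ks with
  | nil => intro d _; simp
  | cons k ks ih =>
    intro d hnd
    have hnd' := hnd.of_cons
    simp only [List.foldl_cons]
    rw [ih _ hnd']
    rw [PySem.Dict.getD_insert]
    by_cases ht : t = k
    · subst ht
      have : t ∉ ks := by simpa using (List.nodup_cons.mp hnd).1
      simp [this]
    · simp [ht, List.mem_cons]

-- Main invariant of A's outer loop: keys and per-token values of the accumulator.
lemma outer_invariant (counts : List (List (String × Int))) :
    ∀ d : PySem.Dict String Int, (∀ c ∈ counts, (c.map Prod.fst).Nodup) → d.keys.Nodup →
    (counts.foldl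
        (fun total_count count =>
          (count.map Prod.fst).foldl
            (fun d k => d.insert k (d.getD k 0 + (PySem.Dict.mk count).getD k 0)) total_count)
        d).keys
      = PySem.Set.update d.keys (counts.flatMap (fun c => c.map Prod.fst))
    ∧ (counts.foldl
        (fun total_count count =>
          (count.map Prod.fst).foldl
            (fun d k => d.insert k (d.getD k 0 + (PySem.Dict.mk count).getD k 0)) total_count)
        d).keys.Nodup
    ∧ ∀ t, (counts.foldl
        (fun total_count count =>
          (count.map Prod.fst).foldl
            (fun d k => d.insert k (d.getD k 0 + (PySem.Dict.mk count).getD k 0)) total_count)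
        d).getD t 0
      = d.getD t 0 + (counts.map (fun c => (PySem.Dict.mk c).getD t 0)).sum := by
  induction counts with
  | nil => intro d _ hd; simp [PySem.Set.update, hd]
  | cons c cs ih =>
    intro d hpre hd
    have hc : (c.map Prod.fst).Nodup := hpre c (by simp)
    have hpre' : ∀ x ∈ cs, (x.map Prod.fst).Nodup := fun x hx => hpre x (by simp [hx])
    set d1 := (c.map Prod.fst).foldl
        (fun d k => d.insert k (d.getD k 0 + (PySem.Dict.mk c).getD k 0)) d with hd1
    have hd1keys : d1.keys = PySem.Set.update d.keys (c.map Prod.fst) :=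
      PySem.Dict.keys_foldl_insert _ _ _
    have hd1nd : d1.keys.Nodup := PySem.Dict.nodup_keys_foldl_insert _ _ _ hd
    obtain ⟨hk, hnd, hv⟩ := ih d1 hpre' hd1nd
    refine ⟨?_, by simpa using hnd, ?_⟩
    · simp only [List.foldl_cons]
      rw [hk, hd1keys]
      simp [PySem.Set.update, List.foldl_append]
    · intro t
      simp only [List.foldl_cons]
      rw [hv t]
      have : d1.getD t 0 = d.getD t 0 + (PySem.Dict.mk c).getD t 0 := by
        rw [hd1, getD_foldl_keys _ _ _ _ hc]
        by_cases ht : t ∈ c.map Prod.fst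
        · simp [ht]
        · have : (PySem.Dict.mk c).getD t 0 = 0 := by
            apply PySem.Dict.getD_of_not_contains
            by_contra hcon
            simp only [Bool.not_eq_false] at hcon
            exact ht (by simpa [PySem.Dict.keys] using
              (PySem.Dict.contains_iff_mem_keys _ _).1 hcon)
          simp [ht, this]
      rw [this]
      simp [add_assoc]

-- ===== VERDICT (by name: the statement is the Claim_ definition above) =====
theorem merge_tokens_counts_py_spec : Claim_equal_merge_tokens_counts_py := by
  intro counts _ hpre
  unfold Spec_merge_tokens_counts_py merge_tokens_counts_py merge_tokens_counts_py_alt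
  have hcongr : counts.foldl
      (fun total_count count =>
        (count.map Prod.fst).foldl
          (fun total_count token =>
            let tc := if total_count.contains token then total_count
                      else total_count.insert token 0
            tc.insert token (tc.getD token 0 + (PySem.Dict.mk count).getD token 0))
          total_count)
      PySem.Dict.empty
      = counts.foldl
      (fun total_count count =>
        (count.map Prod.fst).foldl
          (fun d k => d.insert k (d.getD k 0 + (PySem.Dict.mk count).getD k 0)) total_count)
      PySem.Dict.empty := by
    apply PySem.List.foldl_congr_mem
    intro acc c _
    apply PySem.List.foldl_congr_mem
    intro d k _
    exact inner_eq_insert d k _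
  rw [hcongr]
  obtain ⟨hk, hnd, hv⟩ := outer_invariant counts PySem.Dict.empty hpre
    (by simp)
  rw [PySem.Dict.items_eq_map_keys _ hnd 0, hk]
  rw [PySem.List.dedup_eq_ofList]
  have hupd : PySem.Set.update ((PySem.Dict.empty : PySem.Dict String Int)).keys
      (counts.flatMap (fun c => c.map Prod.fst))
      = PySem.Set.ofList (counts.flatMap (fun c => c.map Prod.fst)) := by
    simp [PySem.Set.update, PySem.Set.ofList_eq_foldl, PySem.Dict.keys_empty]
  rw [hupd]
  apply List.map_congr_left
  intro t _
  rw [hv t]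
  simp [PySem.Dict.getD_empty]
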